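-- pv_equiv track=rewrite | github.com/vcahlik/fifteen-puzzle | prototype/prototype/heuristics/pattern_database_heuristic.py | _db_readjusted_positions
-- ===== SOURCE A (Python) =====
-- def _db_readjusted_positions(pebble_positions):
--     readjustments = [0 for _ in pebble_positions]
--
--     for i, current_position in enumerate(pebble_positions[:-1]):
--         for j, latter_position in enumerate(pebble_positions[i + 1:]):
--             if latter_position > current_position:
--                 readjustments[i + j + 1] = readjustments[i + j + 1] - 1
--
--     for i, readjustment in enumerate(readjustments):
--         readjustments[i] = pebble_positions[i] + readjustment
--
--     return readjustments
-- ===== SOURCE B (Python) =====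
-- def _db_readjusted_positions(pebble_positions):
--     # One pass with a sorted auxiliary list: for each element, binary-search
--     # how many previously seen values are smaller, subtract, then insert it.
--     seen = []
--     result = []
--     for x in pebble_positions:
--         lo, hi = 0, len(seen)
--         while lo < hi:
--             mid = (lo + hi) // 2
--             if seen[mid] < x:
--                 lo = mid + 1
--             else:
--                 hi = mid
--         result.append(x - lo)
--         seen.insert(lo, x)
--     return result
-- ===== Notes on version B (the rewrite author's own statement) =====
-- stated objective: faster
-- what changed: A's quadratic double loop over all pairs (with an in-place readjustment array) is replaced by a single left-to-right pass that keeps the already-seen values in a sorted list and binary-searches it for the number of strictly smaller predecessors of each element.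
import Mathlib
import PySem

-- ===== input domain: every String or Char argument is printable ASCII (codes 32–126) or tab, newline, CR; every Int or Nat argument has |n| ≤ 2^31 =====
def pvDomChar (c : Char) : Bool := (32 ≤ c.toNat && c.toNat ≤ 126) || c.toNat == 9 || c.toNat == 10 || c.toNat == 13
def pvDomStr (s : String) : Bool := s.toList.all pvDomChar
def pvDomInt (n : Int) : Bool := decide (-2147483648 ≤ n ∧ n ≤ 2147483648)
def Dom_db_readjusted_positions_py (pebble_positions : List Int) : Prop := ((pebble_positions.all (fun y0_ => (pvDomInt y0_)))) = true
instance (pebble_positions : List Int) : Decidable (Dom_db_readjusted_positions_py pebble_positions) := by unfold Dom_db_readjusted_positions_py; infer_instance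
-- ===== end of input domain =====

-- B replaces A's quadratic pairwise double loop by a single pass that binary-searches a
-- sorted list of the already-seen values for the number of smaller predecessors.

-- ===== PORT A =====
def db_readjusted_positions_py (pebble_positions : List Int) : List Int :=
  -- readjustments = [0 for _ in pebble_positions]
  let readjustments : List Int := pebble_positions.map (fun _ => 0)
  -- for i, current_position in enumerate(pebble_positions[:-1]):
  --     for j, latter_position in enumerate(pebble_positions[i + 1:]):
  --         if latter_position > current_position: readjustments[i+j+1] -= 1
  let readjustments :=
    (PySem.List.enumerate (PySem.List.slice pebble_positions none (some (-1)))).foldl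
      (fun r ic =>
        (PySem.List.enumerate (PySem.List.slice pebble_positions (some (ic.1 + 1)) none)).foldl
          (fun r2 jl =>
            if jl.2 > ic.2 then
              PySem.List.pySetD r2 (ic.1 + jl.1 + 1) (PySem.List.pyGetD r2 (ic.1 + jl.1 + 1) 0 - 1)
            else r2)
          r)
      readjustments
  -- for i, readjustment in enumerate(readjustments): readjustments[i] = pebble_positions[i] + readjustment
  -- (each write lands exactly on the index just read, so enumerating the snapshot is exact)
  (PySem.List.enumerate readjustments).foldl
    (fun r ir => PySem.List.pySetD r ir.1 (PySem.List.pyGetD pebble_positions ir.1 0 + ir.2))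
    readjustments

-- ===== PORT B =====
-- while lo < hi: mid = (lo+hi)//2; if seen[mid] < x: lo = mid+1 else: hi = mid
-- (lo, hi stay in 0..len(seen), so Nat with getD is exact here)
def bisectLoopB (seen : List Int) (x : Int) (lo hi : Nat) : Nat :=
  if lo < hi then
    if seen.getD ((lo + hi) / 2) 0 < x then bisectLoopB seen x ((lo + hi) / 2 + 1) hi
    else bisectLoopB seen x lo ((lo + hi) / 2)
  else lo
termination_by hi - lo
decreasing_by all_goals omega

def db_readjusted_positions_py_alt (pebble_positions : List Int) : List Int :=
  (pebble_positions.foldl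
    (fun st x =>
      let lo := bisectLoopB st.1 x 0 st.1.length
      (PySem.List.insert st.1 (lo : Int) x, st.2 ++ [x - (lo : Int)]))
    (([] : List Int), ([] : List Int))).2

-- ===== PRECONDITION & SPEC =====
def Spec_db_readjusted_positions_py (pebble_positions : List Int) (out : List Int) : Prop := out = db_readjusted_positions_py_alt pebble_positions
instance (pebble_positions : List Int) (out : List Int) : Decidable (Spec_db_readjusted_positions_py pebble_positions out) := by unfold Spec_db_readjusted_positions_py; infer_instance

-- ===== CLAIM (what is proved, stated in full; the proofs are below) =====
def Claim_equal_db_readjusted_positions_py : Prop := ∀ (pebble_positions : List Int), Dom_db_readjusted_positions_py pebble_positions → Spec_db_readjusted_positions_py pebble_positions (db_readjusted_positions_py pebble_positions)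

-- ===== LEMMAS AND PROOFS =====

theorem innerFold_length (cur : Int) (i : Int) (tail : List Int) :
    ∀ (s : Int) (r : List Int),
    ((PySem.List.enumerate tail s).foldl
      (fun r2 jl =>
        if jl.2 > cur then
          PySem.List.pySetD r2 (i + jl.1 + 1) (PySem.List.pyGetD r2 (i + jl.1 + 1) 0 - 1)
        else r2) r).length = r.length := by
  induction tail with
  | nil => intro s r; simp [PySem.List.enumerate_nil]
  | cons h t ih =>
    intro s r
    rw [PySem.List.enumerate_cons, List.foldl_cons, ih]
    split <;> simp [PySem.List.length_pySetD]

theorem finalFold_length (ps : List Int) (l : List Int) :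
    ∀ (s : Int) (r : List Int),
    ((PySem.List.enumerate l s).foldl
      (fun r ir => PySem.List.pySetD r ir.1 (PySem.List.pyGetD ps ir.1 0 + ir.2)) r).length = r.length := by
  induction l with
  | nil => intro s r; simp [PySem.List.enumerate_nil]
  | cons h t ih =>
    intro s r
    rw [PySem.List.enumerate_cons, List.foldl_cons, ih]
    simp [PySem.List.length_pySetD]

theorem finalFold_getD (ps : List Int) (l : List Int) :
    ∀ (s : Nat) (r : List Int), s + l.length ≤ r.length →
    ∀ k : Nat,
    ((PySem.List.enumerate l (s : Int)).foldl
      (fun r ir => PySem.List.pySetD r ir.1 (PySem.List.pyGetD ps ir.1 0 + ir.2)) r).getD k 0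
      = if s ≤ k ∧ k < s + l.length then ps.getD k 0 + l.getD (k - s) 0 else r.getD k 0 := by
  induction l with
  | nil =>
    intro s r _ k
    rw [PySem.List.enumerate_nil, List.foldl_nil, if_neg (by simp)]
  | cons h t ih =>
    intro s r hr k
    simp only [List.length_cons] at hr
    rw [PySem.List.enumerate_cons, List.foldl_cons]
    have hcast : (s : Int) + 1 = ((s + 1 : Nat) : Int) := by push_cast; ring
    rw [hcast]
    have hs : s < r.length := by omega
    have hlen : s + 1 + t.length ≤ (PySem.List.pySetD r ((s:Int),h).1 (PySem.List.pyGetD ps ((s:Int),h).1 0 + ((s:Int),h).2)).length := by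
      simp; omega
    rw [ih (s+1) _ hlen k]
    have hD : (PySem.List.pySetD r ((s:Int),h).1 (PySem.List.pyGetD ps ((s:Int),h).1 0 + ((s:Int),h).2)).getD k 0
        = if k = s then PySem.List.pyGetD ps ((s:Int)) 0 + h else r.getD k 0 := by
      have := PySem.List.pyGetD_pySetD_natCast r s k (PySem.List.pyGetD ps ((s:Int)) 0 + h) 0 hs
      simpa using this
    by_cases hk1 : s + 1 ≤ k ∧ k < s + 1 + t.length
    · rw [if_pos hk1, if_pos (by simp only [List.length_cons]; omega : s ≤ k ∧ k < s + (h :: t).length)]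
      have : k - s = (k - (s+1)) + 1 := by omega
      rw [this, List.getD_cons_succ]
    · rw [if_neg hk1, hD]
      by_cases hk2 : k = s
      · subst hk2
        rw [if_pos rfl, if_pos (by simp only [List.length_cons]; omega : k ≤ k ∧ k < k + (h :: t).length)]
        simp
      · rw [if_neg hk2, if_neg (by simp at hk1 ⊢; omega)]

def specGo (pre : List Int) : List Int → List Int
  | [] => []
  | x :: t => (x - (pre.countP (fun y => y < x) : Int)) :: specGo (pre ++ [x]) t

theorem specGo_length (l : List Int) : ∀ pre, (specGo pre l).length = l.length := by
  induction l with
  | nil => intro pre; rfl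
  | cons x t ih => intro pre; simp [specGo, ih]

theorem specGo_getD (l : List Int) : ∀ (pre : List Int) (k : Nat), k < l.length →
    (specGo pre l).getD k 0
      = l.getD k 0 - ((pre ++ l.take k).countP (fun y => y < l.getD k 0) : Int) := by
  induction l with
  | nil => intro pre k hk; simp at hk
  | cons x t ih =>
    intro pre k hk
    cases k with
    | zero => simp [specGo]
    | succ k => simpa [specGo, List.getD_cons_succ, List.append_assoc] using ih (pre ++ [x]) k (by simpa using hk)

theorem countP_range_eq_take (ps : List Int) (x : Int) :
    ∀ k, k ≤ ps.length →
    (List.range k).countP (fun j => decide (ps.getD j 0 < x)) = (ps.take k).countP (fun y => y < x) := by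
  intro k
  induction k with
  | zero => simp
  | succ k ih =>
    intro hk
    rw [List.range_succ, List.countP_append, ih (by omega)]
    have : ps.take (k+1) = ps.take k ++ [ps[k]] := by
      rw [List.take_add_one]; simp [List.getElem?_eq_getElem (by omega : k < ps.length)]
    rw [this, List.countP_append]
    simp [List.getElem?_eq_getElem (by omega : k < ps.length)]
    split_ifs <;> first | rfl | omega

theorem countP_range_truncate (ps : List Int) (x : Int) (k : Nat) (hk : k < ps.length) :
    (List.range (ps.length - 1)).countP
        (fun j => decide (0 + j < k) && decide (ps.getD (0 + j) 0 < x))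
      = (List.range k).countP (fun j => decide (ps.getD j 0 < x)) := by
  have h1 : ps.length - 1 = k + (ps.length - 1 - k) := by omega
  rw [h1, List.range_add, List.countP_append]
  have h2 : (List.map (fun j => k + j) (List.range (ps.length - 1 - k))).countP
      (fun j => decide (0 + j < k) && decide (ps.getD (0 + j) 0 < x)) = 0 := by
    rw [List.countP_map, List.countP_eq_zero]
    intro a _; simp
  rw [h2, Nat.add_zero]
  apply List.countP_congr
  intro j hj
  simp at hj
  simp [hj]

theorem innerFold_getD (cur : Int) (i : Nat) (tail : List Int) :
    ∀ (s : Nat) (r : List Int), i + s + 1 + tail.length ≤ r.length →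
    ∀ k : Nat, k < r.length →
    ((PySem.List.enumerate tail (s : Int)).foldl
      (fun r2 jl =>
        if jl.2 > cur then
          PySem.List.pySetD r2 ((i : Int) + jl.1 + 1) (PySem.List.pyGetD r2 ((i : Int) + jl.1 + 1) 0 - 1)
        else r2) r).getD k 0
      = r.getD k 0 - (if i + s + 1 ≤ k ∧ k < i + s + 1 + tail.length ∧ tail.getD (k - (i + s + 1)) 0 > cur then 1 else 0) := by
  induction tail with
  | nil =>
    intro s r _ k _
    rw [PySem.List.enumerate_nil, List.foldl_nil, if_neg (by simp; omega)]
    ring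
  | cons h t ih =>
    intro s r hr k hk
    simp only [List.length_cons] at hr
    rw [PySem.List.enumerate_cons, List.foldl_cons]
    have hpair1 : (((s : Int), h)).1 = (s : Int) := rfl
    have hpair2 : (((s : Int), h)).2 = h := rfl
    have hcast : (i : Int) + (s : Int) + 1 = ((i + s + 1 : Nat) : Int) := by push_cast; ring
    simp only [hcast]
    have hcast2 : (s : Int) + 1 = ((s + 1 : Nat) : Int) := by push_cast; ring
    simp only [hcast2]
    have hr'len : ((if h > cur then
          PySem.List.pySetD r (((i + s + 1 : Nat) : Int)) (PySem.List.pyGetD r (((i + s + 1 : Nat) : Int)) 0 - 1)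
        else r) : List Int).length = r.length := by
      split <;> simp [PySem.List.length_pySetD]
    have hr'getD : ∀ m : Nat, ((if h > cur then
          PySem.List.pySetD r (((i + s + 1 : Nat) : Int)) (PySem.List.pyGetD r (((i + s + 1 : Nat) : Int)) 0 - 1)
        else r) : List Int).getD m 0
        = r.getD m 0 - (if m = i + s + 1 ∧ h > cur then 1 else 0) := by
      intro m
      by_cases hc : h > cur
      · rw [if_pos hc]
        have hin : i + s + 1 < r.length := by omega
        have hset := PySem.List.pyGetD_pySetD_natCast r (i+s+1) m (PySem.List.pyGetD r (((i + s + 1 : Nat)) : Int) 0 - 1) 0 hin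
        simp only [PySem.List.pyGetD_natCast] at hset ⊢
        rw [hset]
        by_cases hm : m = i + s + 1
        · rw [if_pos hm, if_pos ⟨hm, hc⟩]; subst hm; ring
        · rw [if_neg hm, if_neg (fun hx => hm hx.1)]; ring
      · rw [if_neg hc, if_neg (fun hx => hc hx.2)]; ring
    rw [ih (s+1) _ (by rw [hr'len]; omega) k (by rw [hr'len]; exact hk)]
    rw [hr'getD k]
    by_cases hk1 : k = i + s + 1
    · subst hk1
      have hIH : ¬(i + (s+1) + 1 ≤ i + s + 1 ∧ i + s + 1 < i + (s+1) + 1 + t.length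
          ∧ t.getD (i + s + 1 - (i + (s+1) + 1)) 0 > cur) := fun hx => by omega
      rw [if_neg hIH]
      have hco : (h :: t).getD (i + s + 1 - (i + s + 1)) 0 = h := by simp
      by_cases hc : h > cur
      · rw [if_pos ⟨rfl, hc⟩,
            if_pos ⟨le_refl _, by simp only [List.length_cons]; omega, by rw [hco]; exact hc⟩]
        ring
      · rw [if_neg (fun hx => hc hx.2), if_neg (fun hx => hc (hco ▸ hx.2.2))]
        ring
    · rw [if_neg (fun hx => hk1 hx.1)]
      by_cases hk2 : i + s + 1 + 1 ≤ k ∧ k < i + s + 1 + 1 + t.length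
      · have harith : k - (i + s + 1) = (k - (i + (s+1) + 1)) + 1 := by omega
        have hgd : (h :: t).getD (k - (i + s + 1)) 0 = t.getD (k - (i + (s+1) + 1)) 0 := by
          rw [harith, List.getD_cons_succ]
        by_cases hc : t.getD (k - (i + (s+1) + 1)) 0 > cur
        · rw [if_pos ⟨by omega, by omega, hc⟩,
              if_pos ⟨by omega, by simp only [List.length_cons]; omega, by rw [hgd]; exact hc⟩]
          ring
        · rw [if_neg (fun hx => hc hx.2.2), if_neg (fun hx => hc (hgd ▸ hx.2.2))]
          ring
      · rw [if_neg (fun hx => hk2 ⟨by omega, by omega⟩),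
            if_neg (fun hx => hk2 ⟨by omega, by simp only [List.length_cons] at hx; omega⟩)]
        ring

theorem outerFold_length (ps : List Int) (l : List (Int × Int)) :
    ∀ (r : List Int),
    (l.foldl
      (fun r ic =>
        (PySem.List.enumerate (PySem.List.slice ps (some (ic.1 + 1)) none)).foldl
          (fun r2 jl =>
            if jl.2 > ic.2 then
              PySem.List.pySetD r2 (ic.1 + jl.1 + 1) (PySem.List.pyGetD r2 (ic.1 + jl.1 + 1) 0 - 1)
            else r2) r) r).length = r.length := by
  induction l with
  | nil => intro r; rfl
  | cons h t ih =>
    intro r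
    rw [List.foldl_cons, ih]
    exact innerFold_length h.2 h.1 _ 0 r

theorem outerFold_getD (ps : List Int) :
    ∀ (d m : Nat), ps.dropLast.length - m = d →
    ∀ (r : List Int), r.length = ps.length →
    ∀ k, k < ps.length →
    ((PySem.List.enumerate (ps.dropLast.drop m) (m : Int)).foldl
      (fun r ic =>
        (PySem.List.enumerate (PySem.List.slice ps (some (ic.1 + 1)) none)).foldl
          (fun r2 jl =>
            if jl.2 > ic.2 then
              PySem.List.pySetD r2 (ic.1 + jl.1 + 1) (PySem.List.pyGetD r2 (ic.1 + jl.1 + 1) 0 - 1)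
            else r2) r) r).getD k 0
      = r.getD k 0 - ((List.range (ps.length - 1 - m)).countP
          (fun j => decide (m + j < k) && decide (ps.getD (m + j) 0 < ps.getD k 0)) : Int) := by
  intro d
  induction d with
  | zero =>
    intro m hd r hr k hk
    have hnil : ps.dropLast.drop m = [] := by
      apply List.drop_eq_nil_of_le; omega
    rw [hnil, PySem.List.enumerate_nil, List.foldl_nil]
    have : ps.length - 1 - m = 0 := by simp [List.length_dropLast] at hd; omega
    rw [this]
    simp
  | succ d ihd =>
    intro m hd r hr k hk
    have hm : m < ps.dropLast.length := by omega
    have hmn : m < ps.length - 1 := by simpa [List.length_dropLast] using hm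
    rw [List.drop_eq_getElem_cons hm, PySem.List.enumerate_cons, List.foldl_cons]
    simp only [List.getElem_dropLast]
    have hslice : PySem.List.slice ps (some ((m:Int) + 1)) none = ps.drop (m+1) := by
      rw [PySem.List.slice_from ps (by positivity)]
      norm_num
    rw [hslice]
    have hcast : (m:Int) + 1 = (((m+1:Nat)):Int) := by push_cast; ring
    rw [hcast]
    have hlen1 : (List.foldl
            (fun r2 jl =>
              if jl.2 > ps[m]'(by omega) then
                PySem.List.pySetD r2 ((m:Int) + jl.1 + 1)
                  (PySem.List.pyGetD r2 ((m:Int) + jl.1 + 1) 0 - 1)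
              else r2)
            r (PySem.List.enumerate (ps.drop (m+1)))).length = ps.length := by
      rw [innerFold_length ps[m] (m:Int) _ 0 r]; exact hr
    rw [ihd (m+1) (by omega) _ hlen1 k hk]
    have h1 := innerFold_getD (ps[m]'(by omega)) m (ps.drop (m+1)) 0 r
      (by simp only [List.length_drop]; omega) k (by omega)
    simp only [Nat.cast_zero, Nat.add_zero] at h1
    rw [h1]
    have hdlen : (List.drop (m+1) ps).length = ps.length - (m+1) := by simp
    have hgdd : m + 1 ≤ k → (List.drop (m + 1) ps).getD (k - (m + 1)) 0 = ps.getD k 0 := by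
      intro hmk
      rw [List.getD_eq_getElem?_getD, List.getD_eq_getElem?_getD, List.getElem?_drop,
          show (m+1)+(k-(m+1)) = k from by omega]
    have hps_m : (ps[m]'(by omega) : Int) = ps.getD m 0 := (List.getD_eq_getElem ps 0 (by omega)).symm
    have hif : (if m+1 ≤ k ∧ k < m+1+(List.drop (m+1) ps).length ∧ (List.drop (m+1) ps).getD (k-(m+1)) 0 > ps[m]'(by omega) then (1:Int) else 0)
        = (if m < k ∧ ps.getD m 0 < ps.getD k 0 then (1:Int) else 0) := by
      by_cases hcase : m < k ∧ ps.getD m 0 < ps.getD k 0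
      · rw [if_pos hcase, if_pos ⟨by omega, by rw [hdlen]; omega, by rw [hgdd (by omega), hps_m]; exact hcase.2⟩]
      · rw [if_neg hcase, if_neg ?_]
        intro hx
        exact hcase ⟨by omega, by rw [← hps_m]; rw [hgdd (by omega)] at hx; exact hx.2.2⟩
    rw [hif]
    have hcnt : ((List.range (ps.length - 1 - m)).countP
          (fun j => decide (m + j < k) && decide (ps.getD (m + j) 0 < ps.getD k 0)) : Int)
        = ((List.range (ps.length - 1 - (m+1))).countP
          (fun j => decide (m + 1 + j < k) && decide (ps.getD (m + 1 + j) 0 < ps.getD k 0)) : Int)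
          + (if m < k ∧ ps.getD m 0 < ps.getD k 0 then (1:Int) else 0) := by
      rw [show ps.length - 1 - m = (ps.length - 1 - (m+1)) + 1 from by omega,
          List.range_succ_eq_map, List.countP_cons, List.countP_map]
      have hcg : List.countP ((fun j => decide (m + j < k) && decide (ps.getD (m + j) 0 < ps.getD k 0)) ∘ Nat.succ)
            (List.range (ps.length - 1 - (m+1)))
          = List.countP (fun j => decide (m + 1 + j < k) && decide (ps.getD (m + 1 + j) 0 < ps.getD k 0))
            (List.range (ps.length - 1 - (m+1))) := by
        apply List.countP_congr
        intro j _
        simp only [Function.comp]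
        rw [show m + Nat.succ j = m + 1 + j from by omega]
      rw [hcg]
      push_cast
      by_cases hcase : m < k ∧ ps.getD m 0 < ps.getD k 0
      · rw [if_pos hcase, if_pos (by simpa using hcase)]
      · rw [if_neg hcase, if_neg (by simpa using hcase)]
    rw [hcnt]
    ring
theorem bisectLoopB_bounds (seen : List Int) (x : Int) :
    ∀ n lo hi, hi - lo = n → lo ≤ hi → lo ≤ bisectLoopB seen x lo hi ∧ bisectLoopB seen x lo hi ≤ hi := by
  intro n
  induction n using Nat.strong_induction_on with
  | _ n ih =>
    intro lo hi hn hlh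
    rw [bisectLoopB]
    by_cases h : lo < hi
    · rw [if_pos h]
      by_cases hc : seen.getD ((lo + hi) / 2) 0 < x
      · rw [if_pos hc]
        have := ih (hi - ((lo + hi) / 2 + 1)) (by omega) ((lo + hi) / 2 + 1) hi rfl (by omega)
        omega
      · rw [if_neg hc]
        have := ih ((lo + hi) / 2 - lo) (by omega) lo ((lo + hi) / 2) rfl (by omega)
        omega
    · rw [if_neg h]; omega

theorem bisectLoopB_iff (seen : List Int) (x : Int) (hs : List.Pairwise (· ≤ ·) seen) :
    ∀ n lo hi, hi - lo = n → lo ≤ hi → hi ≤ seen.length →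
    (∀ k, k < lo → seen.getD k 0 < x) →
    (∀ k, hi ≤ k → k < seen.length → ¬ seen.getD k 0 < x) →
    ∀ k, k < seen.length → (seen.getD k 0 < x ↔ k < bisectLoopB seen x lo hi) := by
  intro n
  induction n using Nat.strong_induction_on with
  | _ n ih =>
    intro lo hi hn hlh hhi hlow hhigh k hk
    have hmono : ∀ a b, a ≤ b → b < seen.length → seen.getD a 0 ≤ seen.getD b 0 := by
      intro a b hab hb
      rcases Nat.eq_or_lt_of_le hab with heq | hlt
      · subst heq; exact le_refl _
      · rw [List.getD_eq_getElem seen 0 (by omega), List.getD_eq_getElem seen 0 hb]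
        exact List.Pairwise.rel_get_of_lt hs hlt
    rw [bisectLoopB]
    by_cases h : lo < hi
    · rw [if_pos h]
      have hmid : lo ≤ (lo + hi) / 2 ∧ (lo + hi) / 2 < hi := by omega
      by_cases hc : seen.getD ((lo + hi) / 2) 0 < x
      · rw [if_pos hc]
        exact ih (hi - ((lo + hi) / 2 + 1)) (by omega) ((lo + hi) / 2 + 1) hi rfl (by omega) hhi
          (fun m hm => lt_of_le_of_lt (hmono m ((lo + hi) / 2) (by omega) (by omega)) hc)
          hhigh k hk
      · rw [if_neg hc]
        exact ih ((lo + hi) / 2 - lo) (by omega) lo ((lo + hi) / 2) rfl (by omega) (by omega) hlow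
          (fun m hm hmlen => fun hlt => hc (lt_of_le_of_lt (hmono ((lo + hi) / 2) m hm hmlen) hlt))
          k hk
    · rw [if_neg h]
      have hle : lo = hi := by omega
      constructor
      · intro hlt
        by_contra hge
        exact hhigh k (by omega) hk hlt
      · intro hklo
        exact hlow k hklo

theorem bisect_take_drop (seen : List Int) (x : Int) (hs : List.Pairwise (· ≤ ·) seen) :
    (∀ y ∈ seen.take (bisectLoopB seen x 0 seen.length), y < x) ∧
    (∀ y ∈ seen.drop (bisectLoopB seen x 0 seen.length), x ≤ y) := by
  have hb := bisectLoopB_bounds seen x seen.length 0 seen.length rfl (by omega)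
  have hiff := bisectLoopB_iff seen x hs seen.length 0 seen.length rfl (by omega) (le_refl _)
    (fun k hk => absurd hk (Nat.not_lt_zero k))
    (fun k hk hk2 => absurd (lt_of_le_of_lt hk hk2) (lt_irrefl _))
  constructor
  · intro y hy
    obtain ⟨i, hi, rfl⟩ := List.mem_iff_getElem.mp hy
    have hi' : i < seen.length := by
      have := List.length_take_le (bisectLoopB seen x 0 seen.length) seen
      omega
    have hgi : (seen.take (bisectLoopB seen x 0 seen.length))[i] = seen[i] := List.getElem_take
    rw [hgi]
    have := (hiff i hi').mpr (by simp at hi; omega)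
    rwa [List.getD_eq_getElem seen 0 hi'] at this
  · intro y hy
    obtain ⟨i, hi, rfl⟩ := List.mem_iff_getElem.mp hy
    have hi' : bisectLoopB seen x 0 seen.length + i < seen.length := by
      simp at hi; omega
    have hgi : (seen.drop (bisectLoopB seen x 0 seen.length))[i] = seen[bisectLoopB seen x 0 seen.length + i] :=
      List.getElem_drop ..
    rw [hgi]
    by_contra hlt
    have := (hiff (bisectLoopB seen x 0 seen.length + i) hi').mp
      (by rw [List.getD_eq_getElem seen 0 hi']; omega)
    omega

theorem bisect_eq_countP (seen : List Int) (x : Int) (hs : List.Pairwise (· ≤ ·) seen) :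
    bisectLoopB seen x 0 seen.length = seen.countP (fun y => y < x) := by
  have hb := bisectLoopB_bounds seen x seen.length 0 seen.length rfl (by omega)
  have htd := bisect_take_drop seen x hs
  conv_rhs => rw [← List.take_append_drop (bisectLoopB seen x 0 seen.length) seen]
  rw [List.countP_append]
  have h1 : (seen.take (bisectLoopB seen x 0 seen.length)).countP (fun y => y < x)
      = (seen.take (bisectLoopB seen x 0 seen.length)).length := by
    rw [List.countP_eq_length]
    intro a ha
    simpa using htd.1 a ha
  have h2 : (seen.drop (bisectLoopB seen x 0 seen.length)).countP (fun y => y < x) = 0 := by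
    rw [List.countP_eq_zero]
    intro a ha
    have := htd.2 a ha
    simp; omega
  rw [h1, h2, List.length_take]
  omega

theorem bAux (l : List Int) : ∀ (seen acc pre : List Int), List.Pairwise (· ≤ ·) seen → seen.Perm pre →
    (l.foldl
      (fun st x =>
        let lo := bisectLoopB st.1 x 0 st.1.length
        (PySem.List.insert st.1 (lo : Int) x, st.2 ++ [x - (lo : Int)]))
      (seen, acc)).2 = acc ++ specGo pre l := by
  induction l with
  | nil => intro seen acc pre _ _; simp [specGo]
  | cons x t ih =>
    intro seen acc pre hs hp
    rw [List.foldl_cons]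
    have hb := bisectLoopB_bounds seen x seen.length 0 seen.length rfl (by omega)
    have htd := bisect_take_drop seen x hs
    have hins : PySem.List.insert seen ((bisectLoopB seen x 0 seen.length : Nat) : Int) x
        = seen.take (bisectLoopB seen x 0 seen.length) ++ x :: seen.drop (bisectLoopB seen x 0 seen.length) :=
      PySem.List.insert_natCast seen _ x (by omega)
    have hs' : List.Pairwise (· ≤ ·) (seen.take (bisectLoopB seen x 0 seen.length) ++ x :: seen.drop (bisectLoopB seen x 0 seen.length)) := by
      rw [List.pairwise_append]
      refine ⟨hs.sublist (List.take_sublist _ _), ?_, ?_⟩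
      · rw [List.pairwise_cons]
        exact ⟨fun y hy => htd.2 y hy, hs.sublist (List.drop_sublist _ _)⟩
      · intro a ha b hb'
        rcases List.mem_cons.mp hb' with rfl | hbd
        · exact le_of_lt (htd.1 a ha)
        · exact le_trans (le_of_lt (htd.1 a ha)) (htd.2 b hbd)
    have hp' : (seen.take (bisectLoopB seen x 0 seen.length) ++ x :: seen.drop (bisectLoopB seen x 0 seen.length)).Perm (pre ++ [x]) := by
      refine List.Perm.trans List.perm_middle ?_
      rw [List.take_append_drop]
      exact List.Perm.trans (List.Perm.cons x hp) (List.perm_append_singleton x pre).symm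
    have := ih (seen.take (bisectLoopB seen x 0 seen.length) ++ x :: seen.drop (bisectLoopB seen x 0 seen.length))
      (acc ++ [x - (bisectLoopB seen x 0 seen.length : Int)]) (pre ++ [x]) hs' hp'
    show (List.foldl
        (fun st x =>
          let lo := bisectLoopB st.1 x 0 st.1.length
          (PySem.List.insert st.1 (lo : Int) x, st.2 ++ [x - (lo : Int)]))
        (PySem.List.insert seen ((bisectLoopB seen x 0 seen.length : Nat) : Int) x,
         acc ++ [x - ((bisectLoopB seen x 0 seen.length : Nat) : Int)]) t).2
      = acc ++ specGo pre (x :: t)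
    rw [hins, this, bisect_eq_countP seen x hs, List.Perm.countP_eq _ hp]
    simp [specGo]

theorem b_eq_specGo (ps : List Int) : db_readjusted_positions_py_alt ps = specGo [] ps := by
  unfold db_readjusted_positions_py_alt
  simpa using bAux ps [] [] [] List.Pairwise.nil (List.Perm.refl [])

theorem a_eq_specGo (ps : List Int) : db_readjusted_positions_py ps = specGo [] ps := by
  unfold db_readjusted_positions_py
  show ((PySem.List.enumerate
      ((PySem.List.enumerate (PySem.List.slice ps none (some (-1)))).foldl
        (fun r ic =>
          (PySem.List.enumerate (PySem.List.slice ps (some (ic.1 + 1)) none)).foldl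
            (fun r2 jl =>
              if jl.2 > ic.2 then
                PySem.List.pySetD r2 (ic.1 + jl.1 + 1) (PySem.List.pyGetD r2 (ic.1 + jl.1 + 1) 0 - 1)
              else r2) r)
        (ps.map (fun _ => (0:Int))))).foldl
    (fun r ir => PySem.List.pySetD r ir.1 (PySem.List.pyGetD ps ir.1 0 + ir.2))
    ((PySem.List.enumerate (PySem.List.slice ps none (some (-1)))).foldl
        (fun r ic =>
          (PySem.List.enumerate (PySem.List.slice ps (some (ic.1 + 1)) none)).foldl
            (fun r2 jl =>
              if jl.2 > ic.2 then
                PySem.List.pySetD r2 (ic.1 + jl.1 + 1) (PySem.List.pyGetD r2 (ic.1 + jl.1 + 1) 0 - 1)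
              else r2) r)
        (ps.map (fun _ => (0:Int))))) = specGo [] ps
  have hsliceA : PySem.List.slice ps none (some (-1)) = ps.dropLast := by simp [pysem]
  rw [hsliceA]
  have hzlen : (ps.map (fun _ => (0:Int))).length = ps.length := by simp
  have hzget : ∀ k : Nat, (ps.map (fun _ => (0:Int))).getD k 0 = 0 := by
    intro k
    rcases h : ps[k]? with _ | v <;>
      simp [List.getD]
  -- the middle fold, characterized pointwise
  have hRlen : ((PySem.List.enumerate ps.dropLast).foldl
        (fun r ic =>
          (PySem.List.enumerate (PySem.List.slice ps (some (ic.1 + 1)) none)).foldl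
            (fun r2 jl =>
              if jl.2 > ic.2 then
                PySem.List.pySetD r2 (ic.1 + jl.1 + 1) (PySem.List.pyGetD r2 (ic.1 + jl.1 + 1) 0 - 1)
              else r2) r)
        (ps.map (fun _ => (0:Int)))).length = ps.length := by
    rw [outerFold_length]; exact hzlen
  have hRget : ∀ k : Nat, k < ps.length → ((PySem.List.enumerate ps.dropLast).foldl
        (fun r ic =>
          (PySem.List.enumerate (PySem.List.slice ps (some (ic.1 + 1)) none)).foldl
            (fun r2 jl =>
              if jl.2 > ic.2 then
                PySem.List.pySetD r2 (ic.1 + jl.1 + 1) (PySem.List.pyGetD r2 (ic.1 + jl.1 + 1) 0 - 1)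
              else r2) r)
        (ps.map (fun _ => (0:Int)))).getD k 0
      = ps.getD k 0 - ps.getD k 0 - ((ps.take k).countP (fun y => y < ps.getD k 0) : Int) := by
    intro k hk
    have hout := outerFold_getD ps ps.dropLast.length 0 rfl (ps.map (fun _ => (0:Int))) hzlen k hk
    simp only [List.drop_zero, Nat.cast_zero, Nat.sub_zero] at hout
    rw [hout, hzget k, countP_range_truncate ps (ps.getD k 0) k hk,
        countP_range_eq_take ps (ps.getD k 0) k (by omega)]
    ring
  apply List.ext_getElem
  · rw [finalFold_length, hRlen, specGo_length]
  · intro k hk1 hk2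
    have hk : k < ps.length := by
      rw [finalFold_length, hRlen] at hk1; exact hk1
    rw [← List.getD_eq_getElem _ 0 hk1, ← List.getD_eq_getElem _ 0 hk2]
    have hfin := finalFold_getD ps
      ((PySem.List.enumerate ps.dropLast).foldl
        (fun r ic =>
          (PySem.List.enumerate (PySem.List.slice ps (some (ic.1 + 1)) none)).foldl
            (fun r2 jl =>
              if jl.2 > ic.2 then
                PySem.List.pySetD r2 (ic.1 + jl.1 + 1) (PySem.List.pyGetD r2 (ic.1 + jl.1 + 1) 0 - 1)
              else r2) r)
        (ps.map (fun _ => (0:Int)))) 0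
      ((PySem.List.enumerate ps.dropLast).foldl
        (fun r ic =>
          (PySem.List.enumerate (PySem.List.slice ps (some (ic.1 + 1)) none)).foldl
            (fun r2 jl =>
              if jl.2 > ic.2 then
                PySem.List.pySetD r2 (ic.1 + jl.1 + 1) (PySem.List.pyGetD r2 (ic.1 + jl.1 + 1) 0 - 1)
              else r2) r)
        (ps.map (fun _ => (0:Int)))) (by omega) k
    simp only [Nat.cast_zero, Nat.zero_add, Nat.sub_zero] at hfin
    rw [hfin, if_pos ⟨Nat.zero_le k, by rw [hRlen]; omega⟩, hRget k hk,
        specGo_getD ps [] k hk, List.nil_append]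
    ring

-- ===== VERDICT (by name: the statement is the Claim_ definition above) =====
theorem db_readjusted_positions_py_spec : Claim_equal_db_readjusted_positions_py := by
  intro ps _
  unfold Spec_db_readjusted_positions_py
  rw [a_eq_specGo, b_eq_specGo]
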